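-- pv_equiv track=rewrite | github.com/Sanjeevini-G/Code-Library | Water_jugs_problem.py | bfs
-- ===== SOURCE A (Python) =====
-- from collections import deque
--
-- def bfs(x, y, z):
--     q = deque()
--     visited = set()
--
--     q.append((0, 0))
--
--     while q:
--         j1, j2 = q.popleft()
--
--         if (j1, j2) in visited:
--             continue
--
--         visited.add((j1, j2))
--
--         if j1 == z or j2 == z or j1 + j2 == z:
--             return True
--
--         q.append((x, j2))
--         q.append((j1, y))
--         q.append((0, j2))
--         q.append((j1, 0))
--
--         if j1 + j2 <= y:
--             q.append((0, j1 + j2))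
--         else:
--             q.append((j1 - (y - j2), y))
--
--         if j1 + j2 <= x:
--             q.append((j1 + j2, 0))
--         else:
--             q.append((x, j2 - (x - j1)))
--
--     return False
-- ===== SOURCE B (Python) =====
-- def bfs(x, y, z):
--     if z == 0:
--         return True
--     a, b = x, y
--     while b:
--         a, b = b, a % b
--     g = a
--     return 0 <= z <= x + y and z % g == 0
-- ===== Notes on version B (the rewrite author's own statement) =====
-- stated objective: faster
-- what changed: Replaces the breadth-first search over all (jug1, jug2) states by the classical closed form: z is measurable iff z == 0 or 0 <= z <= x + y and gcd(x, y) divides z (gcd by the Euclidean algorithm).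
-- outside the precondition, e.g. on bfs(-1, 1, 5): A returns True, B returns False; on bfs(-4, -3, 2): A does not finish within the time limit, B returns False
import Mathlib
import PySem

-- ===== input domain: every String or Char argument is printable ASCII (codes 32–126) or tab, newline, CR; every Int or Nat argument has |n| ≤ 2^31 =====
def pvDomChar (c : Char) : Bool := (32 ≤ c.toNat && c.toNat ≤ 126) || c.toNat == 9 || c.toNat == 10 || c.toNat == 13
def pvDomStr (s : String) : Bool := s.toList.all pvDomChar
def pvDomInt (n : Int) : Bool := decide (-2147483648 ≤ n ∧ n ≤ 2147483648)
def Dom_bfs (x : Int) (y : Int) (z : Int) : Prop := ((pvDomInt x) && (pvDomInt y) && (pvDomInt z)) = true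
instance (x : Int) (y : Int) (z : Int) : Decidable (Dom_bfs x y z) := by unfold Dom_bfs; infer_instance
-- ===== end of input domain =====

-- B replaces A's breadth-first search of the (jug1, jug2) state space by the classical
-- gcd closed form (Euclidean algorithm), an asymptotic speed-up.

-- ===== PORT A =====
-- the six states Python A appends to the queue from state p = (j1, j2)
def pvSuccs (x : Int) (y : Int) (p : Int × Int) : List (Int × Int) :=
  [(x, p.2), (p.1, y), (0, p.2), (p.1, 0),
   if p.1 + p.2 ≤ y then (0, p.1 + p.2) else (p.1 - (y - p.2), y),
   if p.1 + p.2 ≤ x then (p.1 + p.2, 0) else (x, p.2 - (x - p.1))]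

-- "j1 == z or j2 == z or j1 + j2 == z"
def pvHit (z : Int) (p : Int × Int) : Bool := p.1 == z || p.2 == z || p.1 + p.2 == z

-- the "while q:" loop. The deque is ported as a front/back pair (popleft from front,
-- appends cons onto back, refill = reverse: the same FIFO order); the visited set is a
-- Std.HashSet, consumed only through membership, so order never matters. The fuel argument
-- is only a totality guard (a bound sufficient for 0 ≤ x, 0 ≤ y is proved below).
def pvLoop (x : Int) (y : Int) (z : Int) :
    Nat → List (Int × Int) → List (Int × Int) → Std.HashSet (Int × Int) → Bool
  | 0, _, _, _ => false
  | _ + 1, [], [], _ => false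
  | f + 1, [], b :: bs, vis => pvLoop x y z (f + 1) ((b :: bs).reverse) [] vis
  | f + 1, p :: front, back, vis =>
    if vis.contains p then pvLoop x y z f front back vis
    else if pvHit z p then true
    else pvLoop x y z f front ((pvSuccs x y p).reverse ++ back) (vis.insert p)
termination_by f _ back _ => (f, back.length)

def bfs (x : Int) (y : Int) (z : Int) : Bool :=
  pvLoop x y z (7 * ((x.natAbs + 1) * (y.natAbs + 1)) + 1) [(0, 0)] [] ∅

-- ===== PORT B =====
-- "while b: a, b = b, a % b"
def pvEuclid (a : Int) (b : Int) : Int :=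
  if b = 0 then a else pvEuclid b (PySem.Int.mod a b)
termination_by b.natAbs
decreasing_by
  rename_i hb
  rcases lt_trichotomy b 0 with h | h | h
  · have := PySem.Int.mod_neg_bounds a h; omega
  · exact absurd h hb
  · have h1 := PySem.Int.mod_nonneg a h; have h2 := PySem.Int.mod_lt a h; omega

def bfs_alt (x : Int) (y : Int) (z : Int) : Bool :=
  if z == 0 then true
  else decide (0 ≤ z) && decide (z ≤ x + y) && (PySem.Int.mod z (pvEuclid x y) == 0)

-- ===== PRECONDITION & SPEC =====
-- Pre_ excludes inputs with a negative jug capacity and z ≠ 0 (outside the task's natural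
-- domain): there A's state space is infinite, so A either diverges or happens to return True
-- after an unbounded search.
def Pre_bfs (x : Int) (y : Int) (z : Int) : Prop := (0 ≤ x ∧ 0 ≤ y) ∨ z = 0
instance (x : Int) (y : Int) (z : Int) : Decidable (Pre_bfs x y z) := by unfold Pre_bfs; infer_instance

def pvWitness_bfs : Int × Int × Int := (4, 3, 2)

def Spec_bfs (x : Int) (y : Int) (z : Int) (out : Bool) : Prop := out = bfs_alt x y z
instance (x : Int) (y : Int) (z : Int) (out : Bool) : Decidable (Spec_bfs x y z out) := by unfold Spec_bfs; infer_instance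

-- ===== CLAIM (what is proved, stated in full; the proofs are below) =====
def Claim_equal_bfs : Prop := ∀ (x : Int) (y : Int) (z : Int), Dom_bfs x y z → Pre_bfs x y z → Spec_bfs x y z (bfs x y z)

-- ===== LEMMAS AND PROOFS =====

-- the states A's search can ever enqueue (for 0 ≤ x, 0 ≤ y)
def pvInBox (x : Int) (y : Int) (p : Int × Int) : Prop :=
  0 ≤ p.1 ∧ p.1 ≤ x ∧ 0 ≤ p.2 ∧ p.2 ≤ y

-- reachability along A's transition lists
inductive pvReach (x : Int) (y : Int) : Int × Int → Prop
  | init : pvReach x y (0, 0)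
  | step {p q : Int × Int} : pvReach x y p → q ∈ pvSuccs x y p → pvReach x y q

-- the closed-form condition B decides
def pvCond (x : Int) (y : Int) (z : Int) : Prop :=
  0 ≤ z ∧ z ≤ x + y ∧ ((Int.gcd x y : Int) ∣ z)

theorem pvEuclid_step (a b : Int) (ha : 0 ≤ a) (hb : 0 < b) :
    Int.gcd b (PySem.Int.mod a b) = Int.gcd a b := by
  rw [PySem.Int.mod_eq_emod_of_pos hb]
  obtain ⟨m, rfl⟩ := Int.eq_ofNat_of_zero_le ha
  obtain ⟨k, rfl⟩ := Int.eq_ofNat_of_zero_le (le_of_lt hb)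
  rw [← Int.natCast_emod]
  rw [Int.gcd_natCast_natCast, Int.gcd_natCast_natCast]
  rw [Nat.gcd_comm k (m % k), ← Nat.gcd_rec, Nat.gcd_comm]

theorem pvEuclid_eq_gcd_aux (n : Nat) : ∀ (a b : Int), b.natAbs ≤ n → 0 ≤ a → 0 ≤ b →
    pvEuclid a b = (Int.gcd a b : Int) := by
  induction n with
  | zero =>
    intro a b hn ha _
    have hb0 : b = 0 := by omega
    subst hb0
    rw [pvEuclid]
    simp [Int.gcd, Int.natAbs_of_nonneg ha]
  | succ n ih =>
    intro a b hn ha hb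
    by_cases h : b = 0
    · subst h; rw [pvEuclid]; simp [Int.gcd, Int.natAbs_of_nonneg ha]
    · have hbpos : 0 < b := lt_of_le_of_ne hb (Ne.symm h)
      rw [pvEuclid]
      rw [if_neg h]
      have h1 := PySem.Int.mod_nonneg a hbpos
      have h2 := PySem.Int.mod_lt a hbpos
      rw [ih b (PySem.Int.mod a b) (by omega) hb h1]
      rw [pvEuclid_step a b ha hbpos]

theorem pvEuclid_eq_gcd (a b : Int) (ha : 0 ≤ a) (hb : 0 ≤ b) :
    pvEuclid a b = (Int.gcd a b : Int) :=
  pvEuclid_eq_gcd_aux b.natAbs a b le_rfl ha hb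

theorem pvSuccs_closed (x y : Int) (hx : 0 ≤ x) (hy : 0 ≤ y) (p : Int × Int)
    (hp : pvInBox x y p) : ∀ s ∈ pvSuccs x y p, pvInBox x y s := by
  obtain ⟨h1, h2, h3, h4⟩ := hp
  intro s hs
  simp only [pvSuccs, List.mem_cons, List.not_mem_nil, or_false] at hs
  rcases hs with rfl | rfl | rfl | rfl | rfl | rfl
  all_goals try split_ifs with h
  all_goals unfold pvInBox
  all_goals dsimp only
  all_goals omega

theorem pvSuccs_dvd (x y : Int) (g : Int) (hgx : g ∣ x) (hgy : g ∣ y) (p : Int × Int)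
    (hp : g ∣ p.1 ∧ g ∣ p.2) : ∀ s ∈ pvSuccs x y p, g ∣ s.1 ∧ g ∣ s.2 := by
  obtain ⟨h1, h2⟩ := hp
  intro s hs
  simp only [pvSuccs, List.mem_cons, List.not_mem_nil, or_false] at hs
  rcases hs with rfl | rfl | rfl | rfl | rfl | rfl
  all_goals try split_ifs with h
  all_goals dsimp only
  all_goals exact ⟨by first | exact h1 | exact hgx | exact dvd_add h1 h2 | exact dvd_zero g | exact dvd_sub h1 (dvd_sub hgy h2),
    by first | exact h2 | exact hgy | exact dvd_add h1 h2 | exact dvd_zero g | exact dvd_sub h2 (dvd_sub hgx h1)⟩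

theorem pvLoop_true (x y z : Int) (g : Int) (hgx : g ∣ x) (hgy : g ∣ y)
    (hx : 0 ≤ x) (hy : 0 ≤ y) :
    ∀ (f : Nat) (front back : List (Int × Int)) (vis : Std.HashSet (Int × Int)),
      (∀ p, p ∈ front ∨ p ∈ back → pvInBox x y p ∧ g ∣ p.1 ∧ g ∣ p.2) →
      pvLoop x y z f front back vis = true →
      ∃ p, pvInBox x y p ∧ (g ∣ p.1 ∧ g ∣ p.2) ∧ pvHit z p = true := by
  intro f front back vis
  induction f, front, back, vis using pvLoop.induct x y z with
  | case1 => intro _ hl; simp [pvLoop] at hl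
  | case2 => intro _ hl; simp [pvLoop] at hl
  | case3 f b bs vis ih =>
    intro hq hl
    rw [pvLoop] at hl
    refine ih ?_ hl
    intro p hp
    apply hq
    rcases hp with hp | hp
    · exact Or.inr (List.mem_reverse.1 hp)
    · simp at hp
  | case4 f p front back vis hc ih =>
    intro hq hl
    rw [pvLoop, if_pos hc] at hl
    exact ih (fun s hs => hq s (by tauto)) hl
  | case5 f p front back vis hc hh =>
    intro hq _
    exact ⟨p, (hq p (Or.inl List.mem_cons_self)).1, (hq p (Or.inl List.mem_cons_self)).2, hh⟩
  | case6 f p front back vis hc hh ih =>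
    intro hq hl
    rw [pvLoop, if_neg hc, if_neg hh] at hl
    refine ih ?_ hl
    intro s hs
    rcases hs with hs | hs
    · exact hq s (Or.inl (List.mem_cons_of_mem p hs))
    · rcases List.mem_append.1 hs with h | h
      · obtain ⟨hb, hd⟩ := hq p (Or.inl List.mem_cons_self)
        have h' := List.mem_reverse.1 h
        exact ⟨pvSuccs_closed x y hx hy p hb s h', pvSuccs_dvd x y g hgx hgy p hd s h'⟩
      · exact hq s (Or.inr h)

theorem pvReach_sub (x y : Int) (S : Int × Int → Prop)
    (hcl : ∀ p, S p → ∀ s ∈ pvSuccs x y p, S s) (h0 : S (0, 0)) :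
    ∀ p, pvReach x y p → S p := by
  intro p hp
  induction hp with
  | init => exact h0
  | step hr hm ih => exact hcl _ ih _ hm

theorem pvVis_card (x y : Int) (hx : 0 ≤ x) (hy : 0 ≤ y) (vis : Std.HashSet (Int × Int))
    (hbox : ∀ p ∈ vis, pvInBox x y p) :
    vis.size ≤ (x.toNat + 1) * (y.toNat + 1) := by
  classical
  have hnd : vis.toList.Nodup := Std.HashSet.distinct_toList.imp (by simp)
  have hsub : vis.toList.toFinset ⊆ (Finset.Icc (0 : Int) x) ×ˢ (Finset.Icc (0 : Int) y) := by
    intro p hp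
    have := hbox p (Std.HashSet.mem_toList.1 (List.mem_toFinset.1 hp))
    obtain ⟨a1, a2, a3, a4⟩ := this
    simp [Finset.mem_product, Finset.mem_Icc]
    omega
  have h1 : vis.toList.toFinset.card = vis.toList.length := List.toFinset_card_of_nodup hnd
  have h2 := Finset.card_le_card hsub
  rw [Finset.card_product] at h2
  rw [Int.card_Icc, Int.card_Icc] at h2
  rw [show ((x : Int) + 1 - 0).toNat = x.toNat + 1 by omega,
      show ((y : Int) + 1 - 0).toNat = y.toNat + 1 by omega] at h2
  rw [← Std.HashSet.length_toList]
  omega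

theorem pvLoop_false (x y z : Int) (hx : 0 ≤ x) (hy : 0 ≤ y) :
    ∀ (f : Nat) (front back : List (Int × Int)) (vis : Std.HashSet (Int × Int)),
      (∀ p, p ∈ front ∨ p ∈ back → pvInBox x y p) →
      (∀ p ∈ vis, pvInBox x y p ∧ pvHit z p = false ∧
        ∀ s ∈ pvSuccs x y p, s ∈ vis ∨ s ∈ front ∨ s ∈ back) →
      ((0, 0) ∈ vis ∨ (0, 0) ∈ front ∨ (0, 0) ∈ back) →
      7 * ((x.toNat + 1) * (y.toNat + 1) - vis.size) + (front.length + back.length) ≤ f →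
      pvLoop x y z f front back vis = false →
      ∀ p, pvReach x y p → pvHit z p = false := by
  intro f front back vis
  induction f, front, back, vis using pvLoop.induct x y z with
  | case1 front back vis =>
    intro hq hvis h0 hf _
    have hlen : front.length = 0 ∧ back.length = 0 := by omega
    obtain rfl := List.length_eq_zero_iff.1 hlen.1
    obtain rfl := List.length_eq_zero_iff.1 hlen.2
    have h0' : (0, 0) ∈ vis := by simpa using h0
    intro p hp
    refine (hvis p (pvReach_sub x y (· ∈ vis) ?_ h0' p hp)).2.1
    intro s hsv t ht
    have := (hvis s hsv).2.2 t ht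
    simpa using this
  | case2 f vis =>
    intro hq hvis h0 hf _
    have h0' : (0, 0) ∈ vis := by simpa using h0
    intro p hp
    refine (hvis p (pvReach_sub x y (· ∈ vis) ?_ h0' p hp)).2.1
    intro s hsv t ht
    have := (hvis s hsv).2.2 t ht
    simpa using this
  | case3 f b bs vis ih =>
    intro hq hvis h0 hf hl
    rw [pvLoop] at hl
    refine ih ?_ ?_ ?_ ?_ hl
    · intro p hp
      apply hq p
      rcases hp with hp | hp
      · exact Or.inr (List.mem_reverse.1 hp)
      · simp at hp
    · intro p hp
      refine ⟨(hvis p hp).1, (hvis p hp).2.1, ?_⟩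
      intro s hs
      rcases (hvis p hp).2.2 s hs with h | h | h
      · exact Or.inl h
      · simp at h
      · exact Or.inr (Or.inl (List.mem_reverse.2 h))
    · rcases h0 with h | h | h
      · exact Or.inl h
      · simp at h
      · exact Or.inr (Or.inl (List.mem_reverse.2 h))
    · simpa using hf
  | case4 f p front back vis hc ih =>
    intro hq hvis h0 hf hl
    rw [pvLoop, if_pos hc] at hl
    have hpm : p ∈ vis := Std.HashSet.contains_iff_mem.1 hc
    refine ih ?_ ?_ ?_ ?_ hl
    · intro s hs; exact hq s (by tauto)
    · intro s hs
      refine ⟨(hvis s hs).1, (hvis s hs).2.1, ?_⟩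
      intro t ht
      rcases (hvis s hs).2.2 t ht with h | h | h
      · exact Or.inl h
      · rcases List.mem_cons.1 h with rfl | h
        · exact Or.inl hpm
        · exact Or.inr (Or.inl h)
      · exact Or.inr (Or.inr h)
    · rcases h0 with h | h | h
      · exact Or.inl h
      · rcases List.mem_cons.1 h with heq | h
        · exact Or.inl (heq ▸ hpm)
        · exact Or.inr (Or.inl h)
      · exact Or.inr (Or.inr h)
    · simp at hf ⊢; omega
  | case5 f p front back vis hc hh =>
    intro hq hvis h0 hf hl
    rw [pvLoop, if_neg hc, if_pos hh] at hl
    exact absurd hl (by simp)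
  | case6 f p front back vis hc hh ih =>
    intro hq hvis h0 hf hl
    rw [pvLoop, if_neg hc, if_neg hh] at hl
    have hpm : p ∉ vis := fun hm => hc (Std.HashSet.contains_iff_mem.2 hm)
    have hpbox : pvInBox x y p := hq p (Or.inl List.mem_cons_self)
    have hsize : vis.size + 1 ≤ (x.toNat + 1) * (y.toNat + 1) := by
      have := pvVis_card x y hx hy (vis.insert p) ?_
      · rwa [Std.HashSet.size_insert, if_neg hpm] at this
      · intro s hs
        rcases (by simpa using Std.HashSet.mem_insert.1 hs : p = s ∨ s ∈ vis) with rfl | hs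
        · exact hpbox
        · exact (hvis s hs).1
    refine ih ?_ ?_ ?_ ?_ hl
    · intro s hs
      rcases hs with hs | hs
      · exact hq s (Or.inl (List.mem_cons_of_mem p hs))
      · rcases List.mem_append.1 hs with h | h
        · exact pvSuccs_closed x y hx hy p hpbox s (List.mem_reverse.1 h)
        · exact hq s (Or.inr h)
    · intro s hs
      rcases (by simpa using Std.HashSet.mem_insert.1 hs : p = s ∨ s ∈ vis) with rfl | hs
      · refine ⟨hpbox, by simpa using hh, ?_⟩
        intro t ht
        exact Or.inr (Or.inr (List.mem_append.2 (Or.inl (List.mem_reverse.2 ht))))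
      · refine ⟨(hvis s hs).1, (hvis s hs).2.1, ?_⟩
        intro t ht
        rcases (hvis s hs).2.2 t ht with h | h | h
        · exact Or.inl (by simp [Std.HashSet.mem_insert, h])
        · rcases List.mem_cons.1 h with rfl | h
          · exact Or.inl (by simp [Std.HashSet.mem_insert])
          · exact Or.inr (Or.inl h)
        · exact Or.inr (Or.inr (List.mem_append.2 (Or.inr h)))
    · rcases h0 with h | h | h
      · exact Or.inl (by simp [Std.HashSet.mem_insert, h])
      · rcases List.mem_cons.1 h with heq | h
        · exact Or.inl (by simp [Std.HashSet.mem_insert, heq])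
        · exact Or.inr (Or.inl h)
      · exact Or.inr (Or.inr (List.mem_append.2 (Or.inr h)))
    · have h6 : (pvSuccs x y p).length = 6 := by simp [pvSuccs]
      simp only [List.length_append, List.length_cons, List.length_reverse, h6] at hf ⊢
      rw [Std.HashSet.size_insert, if_neg hpm]
      omega

theorem pvMem_fill1 (x y : Int) (p : Int × Int) : (x, p.2) ∈ pvSuccs x y p := by
  simp [pvSuccs]

theorem pvMem_fill2 (x y : Int) (p : Int × Int) : (p.1, y) ∈ pvSuccs x y p := by
  simp [pvSuccs]

theorem pvMem_empty2 (x y : Int) (p : Int × Int) : (p.1, 0) ∈ pvSuccs x y p := by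
  simp [pvSuccs]

theorem pvMem_pour12_le (x y : Int) (p : Int × Int) (h : p.1 + p.2 ≤ y) :
    (0, p.1 + p.2) ∈ pvSuccs x y p := by
  simp [pvSuccs, if_pos h]

theorem pvMem_pour12_gt (x y : Int) (p : Int × Int) (h : ¬ p.1 + p.2 ≤ y) :
    (p.1 - (y - p.2), y) ∈ pvSuccs x y p := by
  simp [pvSuccs, if_neg h]

theorem pvSwap_mem (x y : Int) (p q : Int × Int) (h : q ∈ pvSuccs x y p) :
    (q.2, q.1) ∈ pvSuccs y x (p.2, p.1) := by
  simp only [pvSuccs, List.mem_cons, List.not_mem_nil, or_false] at h ⊢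
  rcases h with rfl | rfl | rfl | rfl | rfl | rfl
  · right; left; rfl
  · left; rfl
  · right; right; right; left; rfl
  · right; right; left; rfl
  · right; right; right; right; right
    split_ifs with h1 h2 h2 <;> simp <;> omega
  · right; right; right; right; left
    split_ifs with h1 h2 h2 <;> simp <;> omega

theorem pvReach_swap (x y : Int) (p : Int × Int) (h : pvReach x y p) :
    pvReach y x (p.2, p.1) := by
  induction h with
  | init => exact pvReach.init
  | step hr hm ih => exact pvReach.step ih (pvSwap_mem _ _ _ _ hm)

theorem pvReach_drain (x y : Int) (_hx : 0 ≤ x) (hy : 0 < y) :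
    ∀ (n : Nat) (a b : Int), a.toNat ≤ n → 0 ≤ a → 0 ≤ b → b < y →
      pvReach x y (a, b) → pvReach x y (0, (a + b) % y) := by
  intro n
  induction n with
  | zero =>
    intro a b hn ha hb hby hr
    have ha0 : a = 0 := by omega
    subst ha0
    have hle : (0 : Int) + b ≤ y := by omega
    have := pvReach.step hr (pvMem_pour12_le x y (0, b) hle)
    rwa [Int.emod_eq_of_lt (by omega) (by omega)]
  | succ n ih =>
    intro a b hn ha hb hby hr
    by_cases hc : a + b ≤ y
    · have h1 := pvReach.step hr (pvMem_pour12_le x y (a, b) hc)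
      by_cases heq : a + b = y
      · have h2 := pvReach.step h1 (pvMem_empty2 x y (0, a + b))
        simp only at h2
        rwa [heq, Int.emod_self]
      · rwa [Int.emod_eq_of_lt (by omega) (by omega)]
    · have h1 := pvReach.step hr (pvMem_pour12_gt x y (a, b) hc)
      have he : (a : Int) - (y - b) = a + b - y := by ring
      rw [he] at h1
      have h2 := pvReach.step h1 (pvMem_empty2 x y (a + b - y, y))
      simp only at h2
      have h3 := ih (a + b - y) 0 (by omega) (by omega) le_rfl hy h2
      rw [add_zero] at h3
      rwa [Int.sub_emod_right] at h3

theorem pvReach_mult (x y : Int) (hx : 0 ≤ x) (hy : 0 < y) :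
    ∀ n : Nat, pvReach x y (0, ((n : Int) * x) % y) := by
  intro n
  induction n with
  | zero => simpa using pvReach.init
  | succ n ih =>
    have hm1 : 0 ≤ ((n : Int) * x) % y := Int.emod_nonneg _ (ne_of_gt hy)
    have hm2 : ((n : Int) * x) % y < y := Int.emod_lt_of_pos _ hy
    have h1 := pvReach.step ih (pvMem_fill1 x y (0, ((n : Int) * x) % y))
    have h2 := pvReach_drain x y hx hy x.toNat x (((n : Int) * x) % y) le_rfl hx hm1 hm2 h1
    have he : (x + ((n : Int) * x) % y) % y = (((n : Int) + 1) * x) % y := by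
      conv_rhs => rw [add_mul, one_mul, add_comm]
      rw [Int.add_emod, Int.emod_emod_of_dvd _ dvd_rfl, ← Int.add_emod]
    rw [he] at h2
    push_cast
    exact h2

theorem pvSolve (x y w : Int) (hy : 0 < y) (hd : (Int.gcd x y : Int) ∣ w) :
    ∃ n : Nat, ((n : Int) * x) % y = w % y := by
  obtain ⟨k, hk⟩ := hd
  refine ⟨((Int.gcdA x y * k) % y).toNat, ?_⟩
  set u := Int.gcdA x y * k with hu
  have hun : (0 : Int) ≤ u % y := Int.emod_nonneg _ (ne_of_gt hy)
  rw [Int.toNat_of_nonneg hun]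
  have h1 : (u % y * x) % y = (u * x) % y := by
    rw [Int.mul_emod, Int.emod_emod_of_dvd _ dvd_rfl, ← Int.mul_emod]
  have h2 : (u * x) % y = w % y := by
    rw [Int.emod_eq_emod_iff_emod_sub_eq_zero]
    have he : u * x - w = y * (-(Int.gcdB x y * k)) := by
      rw [hu, hk, Int.gcd_eq_gcd_ab]; ring
    rw [he]
    exact Int.mul_emod_right _ _
  rw [h1, h2]

theorem pvReachSnd (x y w : Int) (hx : 0 ≤ x) (hy : 0 < y) (h0 : 0 ≤ w) (hw : w < y)
    (hd : (Int.gcd x y : Int) ∣ w) : pvReach x y (0, w) := by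
  obtain ⟨n, hn⟩ := pvSolve x y w hy hd
  have := pvReach_mult x y hx hy n
  rwa [hn, Int.emod_eq_of_lt h0 hw] at this

theorem pvReach_hit (x y z : Int) (hx : 0 ≤ x) (hy : 0 ≤ y) (hC : pvCond x y z) :
    ∃ p, pvReach x y p ∧ pvHit z p = true := by
  obtain ⟨hz0, hzxy, hzd⟩ := hC
  by_cases hz : z = 0
  · exact ⟨(0, 0), pvReach.init, by simp [pvHit, hz]⟩
  have hzpos : 0 < z := lt_of_le_of_ne hz0 (Ne.symm hz)
  rcases eq_or_lt_of_le hy with hy0 | hypos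
  · -- y = 0
    have hy0 : y = 0 := hy0.symm
    subst hy0
    have hgx : (Int.gcd x 0 : Int) = x := by
      rw [Int.gcd_zero_right]; exact Int.natAbs_of_nonneg hx
    rw [hgx] at hzd
    have hxz : x ≤ z := Int.le_of_dvd hzpos hzd
    have hzx : z = x := by omega
    refine ⟨(x, 0), pvReach.step pvReach.init (pvMem_fill1 x 0 (0, 0)), ?_⟩
    simp [pvHit, hzx]
  · -- 0 < y
    rcases lt_trichotomy z y with hzy | hzy | hzy
    · exact ⟨(0, z), pvReachSnd x y z hx hypos hz0 hzy hzd, by simp [pvHit]⟩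
    · refine ⟨(0, y), pvReach.step pvReach.init (pvMem_fill2 x y (0, 0)), ?_⟩
      simp [pvHit, hzy]
    · by_cases hxz : x ≤ z
      · have hm0 : 0 ≤ z - x := by omega
        have hmy : z - x ≤ y := by omega
        rcases eq_or_lt_of_le hmy with hmeq | hmlt
        · have h1 := pvReach.step pvReach.init (pvMem_fill2 x y (0, 0))
          have h2 := pvReach.step h1 (pvMem_fill1 x y (0, y))
          refine ⟨(x, y), h2, ?_⟩
          have : x + y = z := by omega
          simp [pvHit, this]
        · have hdm : (Int.gcd x y : Int) ∣ z - x := dvd_sub hzd (Int.gcd_dvd_left x y)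
          have h1 := pvReachSnd x y (z - x) hx hypos hm0 hmlt hdm
          have h2 := pvReach.step h1 (pvMem_fill1 x y (0, z - x))
          refine ⟨(x, z - x), h2, ?_⟩
          have : x + (z - x) = z := by ring
          simp [pvHit, this]
      · have hzx : z < x := by omega
        have hxpos : 0 < x := by omega
        have hdyx : (Int.gcd y x : Int) ∣ z := by rwa [Int.gcd_comm]
        have h1 := pvReachSnd y x z hy hxpos hz0 hzx hdyx
        have h2 := pvReach_swap y x (0, z) h1
        exact ⟨(z, 0), h2, by simp [pvHit]⟩

theorem pv_zero (x y z : Int) (hz : z = 0) : bfs x y z = true ∧ bfs_alt x y z = true := by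
  subst hz
  constructor
  · rw [bfs, pvLoop]
    simp [pvHit]
  · simp [bfs_alt]

theorem pv_main (x y z : Int) (hx : 0 ≤ x) (hy : 0 ≤ y) : bfs x y z = bfs_alt x y z := by
  have hgxy : pvEuclid x y = (Int.gcd x y : Int) := pvEuclid_eq_gcd x y hx hy
  by_cases hC : pvCond x y z
  · -- both true
    obtain ⟨p, hr, hh⟩ := pvReach_hit x y z hx hy hC
    have hbfs : bfs x y z = true := by
      cases hb : bfs x y z with
      | true => rfl
      | false =>
        exfalso
        rw [bfs] at hb
        have := pvLoop_false x y z hx hy _ [(0, 0)] [] ∅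
          (by intro s hs; simp at hs; subst hs; exact ⟨le_rfl, hx, le_rfl, hy⟩)
          (by intro s hs; simp at hs)
          (by simp)
          (by simp [Std.HashSet.size_empty]
              rw [show x.natAbs = x.toNat by omega, show y.natAbs = y.toNat by omega])
          hb p hr
        rw [this] at hh
        exact Bool.false_ne_true hh
    rw [hbfs]
    by_cases hz : z = 0
    · simp [bfs_alt, hz]
    · have hzpos : 0 < z := lt_of_le_of_ne hC.1 (Ne.symm hz)
      rw [bfs_alt, hgxy]
      rw [if_neg (by simpa using hz)]
      have h3 : PySem.Int.mod z (Int.gcd x y : Int) = 0 :=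
        (PySem.Int.mod_eq_zero_iff_dvd z _).2 hC.2.2
      simp [hC.1, hC.2.1, h3]
  · -- both false
    have hz : z ≠ 0 := by
      intro h; subst h
      exact hC ⟨le_rfl, by omega, dvd_zero _⟩
    have halt : bfs_alt x y z = false := by
      rw [bfs_alt, hgxy, if_neg (by simpa using hz)]
      by_cases h1 : 0 ≤ z
      · by_cases h2 : z ≤ x + y
        · have h3 : ¬ (Int.gcd x y : Int) ∣ z := fun hd => hC ⟨h1, h2, hd⟩
          have h4 : PySem.Int.mod z (Int.gcd x y : Int) ≠ 0 :=
            fun he => h3 ((PySem.Int.mod_eq_zero_iff_dvd z _).1 he)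
          simp [h4]
        · simp [h2]
      · simp [h1]
    rw [halt]
    cases hb : bfs x y z with
    | false => rfl
    | true =>
      exfalso
      rw [bfs] at hb
      obtain ⟨p, hbox, hdvd, hh⟩ := pvLoop_true x y z (Int.gcd x y : Int)
        (Int.gcd_dvd_left x y) (Int.gcd_dvd_right x y) hx hy _ [(0, 0)] [] ∅
        (by intro s hs; simp at hs; subst hs
            exact ⟨⟨le_rfl, hx, le_rfl, hy⟩, dvd_zero _, dvd_zero _⟩)
        hb
      apply hC
      obtain ⟨b1, b2, b3, b4⟩ := hbox
      simp only [pvHit, Bool.or_eq_true, beq_iff_eq] at hh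
      rcases hh with (rfl | rfl) | rfl
      · exact ⟨b1, by omega, hdvd.1⟩
      · exact ⟨b3, by omega, hdvd.2⟩
      · exact ⟨by omega, by omega, dvd_add hdvd.1 hdvd.2⟩

-- ===== VERDICT (by name: the statement is the Claim_ definition above) =====
theorem bfs_spec : Claim_equal_bfs := by
  intro x y z _ hpre
  unfold Spec_bfs
  rcases hpre with ⟨hx, hy⟩ | hz
  · exact pv_main x y z hx hy
  · rw [(pv_zero x y z hz).1, (pv_zero x y z hz).2]
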